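-- pv_equiv track=rewrite | github.com/mvictoriam/Retele | Tema3/helper.py | next_in_dict
-- ===== SOURCE A (Python) =====
-- def next_in_dict(dict, key):
--     lista = sorted(dict.keys())
--     for i in range(len(lista)):
--         if lista[i] == key:
--             if i == len(lista) - 1:
--                 return lista[0]
--             else:
--                 return lista[i + 1]
--     return None
-- ===== SOURCE B (Python) =====
-- def next_in_dict(dict, key):
--     found = False
--     minimum = None
--     successor = None
--     for k in dict.keys():
--         if k == key:
--             found = True
--         if minimum is None or k < minimum:
--             minimum = k
--         if k > key and (successor is None or k < successor):
--             successor = k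
--     if not found:
--         return None
--     return successor if successor is not None else minimum
-- ===== Notes on version B (the rewrite author's own statement) =====
-- stated objective: faster
-- what changed: Replaces sort-then-linear-scan with a single pass over the keys that tracks the overall minimum and the smallest key strictly greater than the given key (the wraparound successor), eliminating the sort.
import Mathlib
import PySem

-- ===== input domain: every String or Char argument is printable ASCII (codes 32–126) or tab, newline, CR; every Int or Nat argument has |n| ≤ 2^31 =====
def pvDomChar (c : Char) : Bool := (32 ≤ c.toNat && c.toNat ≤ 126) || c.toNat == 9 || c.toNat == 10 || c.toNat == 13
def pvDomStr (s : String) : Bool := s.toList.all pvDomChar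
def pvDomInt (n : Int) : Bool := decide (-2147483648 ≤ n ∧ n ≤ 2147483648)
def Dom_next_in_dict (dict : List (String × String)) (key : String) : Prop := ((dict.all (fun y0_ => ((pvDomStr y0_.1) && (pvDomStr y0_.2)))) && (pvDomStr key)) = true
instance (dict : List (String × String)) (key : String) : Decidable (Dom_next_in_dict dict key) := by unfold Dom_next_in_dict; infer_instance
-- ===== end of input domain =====

-- B replaces A's sort-then-scan with one pass maintaining the minimum key and the
-- smallest key strictly greater than the given key (O(n) instead of O(n log n)).

-- ===== PORT A =====
-- the 'for i in range(len(lista)): …' loop with its early returns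
def nidLoopA (lista : List String) (key : String) (i : Nat) : Option String :=
  if h : i < lista.length then
    if lista[i] = key then
      if hl : i = lista.length - 1 then
        some (lista[0]'(Nat.lt_of_le_of_lt (Nat.zero_le i) h))
      else
        some (lista[i + 1]'(by omega))
    else
      nidLoopA lista key (i + 1)
  else
    none
  termination_by lista.length - i

def next_in_dict (dict : List (String × String)) (key : String) : Option String :=
  let lista := PySem.List.sorted (PySem.Dict.keys (PySem.Dict.ofList dict)) (fun x => x) false
  nidLoopA lista key 0

-- ===== PORT B =====
-- 'if minimum is None or k < minimum: minimum = k'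
def nidMin (acc : Option String) (k : String) : Option String :=
  match acc with
  | none => some k
  | some m => if k < m then some k else some m

-- 'if k > key and (successor is None or k < successor): successor = k'
def nidSucc (key : String) (acc : Option String) (k : String) : Option String :=
  if key < k then nidMin acc k else acc

def next_in_dict_alt (dict : List (String × String)) (key : String) : Option String :=
  let st := (PySem.Dict.keys (PySem.Dict.ofList dict)).foldl
    (fun (s : Bool × Option String × Option String) k =>
      (s.1 || (k == key), nidMin s.2.1 k, nidSucc key s.2.2 k))
    (false, none, none)
  if st.1 then
    match st.2.2 with
    | some su => some su
    | none => st.2.1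
  else none

-- ===== PRECONDITION & SPEC =====
def Spec_next_in_dict (dict : List (String × String)) (key : String) (out : Option String) : Prop := out = next_in_dict_alt dict key
instance (dict : List (String × String)) (key : String) (out : Option String) : Decidable (Spec_next_in_dict dict key out) := by unfold Spec_next_in_dict; infer_instance

-- ===== CLAIM (what is proved, stated in full; the proofs are below) =====
def Claim_equal_next_in_dict : Prop := ∀ (dict : List (String × String)) (key : String), Dom_next_in_dict dict key → Spec_next_in_dict dict key (next_in_dict dict key)

-- ===== LEMMAS AND PROOFS =====

-- structural reading of A's loop over a suffix of the sorted list ('first' stands for lista[0])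
def nidGoA (first : Option String) (key : String) : List String → Option String
  | [] => none
  | x :: rest =>
    if x = key then
      match rest with
      | [] => first
      | y :: _ => some y
    else nidGoA first key rest

lemma nidLoopA_eq_goA_aux (lista : List String) (key : String) :
    ∀ (n i : Nat), lista.length - i ≤ n →
      nidLoopA lista key i = nidGoA lista.head? key (lista.drop i) := by
  intro n
  induction n with
  | zero =>
    intro i hn
    have hge : ¬ i < lista.length := by omega
    rw [nidLoopA, dif_neg hge, List.drop_eq_nil_of_le (by omega)]
    rfl
  | succ n ih =>
    intro i hn
    rw [nidLoopA]
    by_cases h : i < lista.length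
    · have hdrop : lista[i] :: lista.drop (i + 1) = lista.drop i := List.getElem_cons_drop ..
      rw [dif_pos h, ← hdrop]
      show _ = nidGoA lista.head? key (lista[i] :: lista.drop (i + 1))
      simp only [nidGoA]
      by_cases hk : lista[i] = key
      · rw [if_pos hk, if_pos hk]
        by_cases hl : i = lista.length - 1
        · have hnil : lista.drop (i + 1) = [] := List.drop_eq_nil_of_le (by omega)
          rw [dif_pos hl, hnil]
          have h0 : 0 < lista.length := by omega
          rw [List.head?_eq_getElem?, List.getElem?_eq_getElem h0]
        · have hi1 : i + 1 < lista.length := by omega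
          have hcons : lista[i+1] :: lista.drop (i + 2) = lista.drop (i + 1) := List.getElem_cons_drop ..
          rw [dif_neg hl, ← hcons]
      · rw [if_neg hk, if_neg hk]
        exact ih (i + 1) (by omega)
    · rw [dif_neg h, List.drop_eq_nil_of_le (by omega)]
      rfl

lemma nidLoopA_eq_goA (lista : List String) (key : String) :
    nidLoopA lista key 0 = nidGoA lista.head? key lista := by
  have := nidLoopA_eq_goA_aux lista key lista.length 0 (by omega)
  rwa [List.drop_zero] at this

-- on a strictly increasing suffix, A's scan returns the head of the strict upper part, else 'first'
lemma nidGoA_spec (first : Option String) (key : String) (t : List String)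
    (hp : t.Pairwise (· < ·)) :
    nidGoA first key t =
      if key ∈ t then
        (match t.filter (fun y => decide (key < y)) with
         | [] => first
         | y :: _ => some y)
      else none := by
  induction t with
  | nil => simp [nidGoA]
  | cons x rest ih =>
    have hrest : rest.Pairwise (· < ·) := (List.pairwise_cons.mp hp).2
    have hxall : ∀ y ∈ rest, x < y := (List.pairwise_cons.mp hp).1
    by_cases hk : x = key
    · subst hk
      have hmem : x ∈ x :: rest := List.mem_cons_self ..
      have h2 : rest.filter (fun y => decide (x < y)) = rest :=
        List.filter_eq_self.mpr (fun y hy => decide_eq_true (hxall y hy))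
      rw [if_pos hmem, List.filter_cons,
          if_neg (by simp only [decide_eq_true_eq]; exact lt_irrefl x), h2]
      simp [nidGoA]
    · simp only [nidGoA]
      rw [if_neg hk, ih hrest]
      by_cases hm : key ∈ rest
      · have hxk : x < key := hxall key hm
        have hfil : (x :: rest).filter (fun y => decide (key < y))
            = rest.filter (fun y => decide (key < y)) := by
          rw [List.filter_cons,
              if_neg (by simp only [decide_eq_true_eq]; exact lt_asymm hxk)]
        have hmem : key ∈ x :: rest := List.mem_cons_of_mem _ hm
        rw [if_pos hm, if_pos hmem, hfil]
      · have hmem : key ∉ x :: rest := by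
          intro h
          rcases List.mem_cons.mp h with h1 | h1
          · exact hk h1.symm
          · exact hm h1
        rw [if_neg hm, if_neg hmem]

-- the running-minimum fold: its result is a minimum of init-and-list
lemma nidMin_fold_some (ks : List String) (a : String) :
    ∃ m, ks.foldl nidMin (some a) = some m ∧ m ∈ a :: ks ∧ m ≤ a ∧ ∀ y ∈ ks, m ≤ y := by
  induction ks generalizing a with
  | nil => exact ⟨a, rfl, List.mem_singleton.mpr rfl, le_refl a, by simp⟩
  | cons k rest ih =>
    simp only [List.foldl_cons, nidMin]
    by_cases hka : k < a
    · rw [if_pos hka]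
      obtain ⟨m, hm, hmem, hle, hall⟩ := ih k
      refine ⟨m, hm, ?_, le_of_lt (lt_of_le_of_lt hle hka), ?_⟩
      · rcases List.mem_cons.mp hmem with h | h
        · exact h ▸ List.mem_cons_of_mem _ (List.mem_cons_self ..)
        · exact List.mem_cons_of_mem _ (List.mem_cons_of_mem _ h)
      · intro y hy
        rcases List.mem_cons.mp hy with h | h
        · exact h ▸ hle
        · exact hall y h
    · rw [if_neg hka]
      obtain ⟨m, hm, hmem, hle, hall⟩ := ih a
      refine ⟨m, hm, ?_, hle, ?_⟩
      · rcases List.mem_cons.mp hmem with h | h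
        · exact h ▸ List.mem_cons_self ..
        · exact List.mem_cons_of_mem _ (List.mem_cons_of_mem _ h)
      · intro y hy
        rcases List.mem_cons.mp hy with h | h
        · exact h ▸ le_trans hle (not_lt.mp hka)
        · exact hall y h

-- the running minimum equals the head of any ≤-sorted rearrangement
lemma nidMin_fold_eq_head (xs ys : List String) (hperm : xs.Perm ys)
    (hs : ys.Pairwise (· ≤ ·)) : xs.foldl nidMin none = ys.head? := by
  cases ys with
  | nil =>
    have : xs = [] := List.Perm.eq_nil hperm
    simp [this]
  | cons h t =>
    have hxs : xs ≠ [] := by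
      intro hx
      rw [hx] at hperm
      have := hperm.length_eq
      simp at this
    obtain ⟨x, xs', rfl⟩ := List.exists_cons_of_ne_nil hxs
    simp only [List.foldl_cons, nidMin, List.head?_cons]
    obtain ⟨m, hm, hmem, hlea, hall'⟩ := nidMin_fold_some xs' x
    rw [hm]
    have hall : ∀ y ∈ x :: xs', m ≤ y := by
      intro y hy
      rcases List.mem_cons.mp hy with h1 | h1
      · exact h1 ▸ hlea
      · exact hall' y h1
    have hmh : m ≤ h := hall h (hperm.mem_iff.mpr (List.mem_cons_self ..))
    have hhm : h ≤ m := by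
      rcases List.mem_cons.mp (hperm.mem_iff.mp hmem) with h1 | h1
      · exact le_of_eq h1.symm
      · exact (List.pairwise_cons.mp hs).1 m h1
    exact congrArg some (le_antisymm hmh hhm)

-- B's 'found' flag is membership
lemma nid_foldl_or_beq (ks : List String) (key : String) (b : Bool) :
    ks.foldl (fun b k => b || (k == key)) b = (b || decide (key ∈ ks)) := by
  induction ks generalizing b with
  | nil => simp
  | cons k rest ih =>
    simp only [List.foldl_cons, ih, List.mem_cons]
    by_cases h : key = k
    · subst h
      simp
    · have hk : (k == key) = false := beq_eq_false_iff_ne.mpr (fun e => h e.symm)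
      simp [h, hk]

-- ===== VERDICT (by name: the statement is the Claim_ definition above) =====
theorem next_in_dict_spec : Claim_equal_next_in_dict := by
  intro dict key _
  unfold Spec_next_in_dict next_in_dict next_in_dict_alt
  set ks := PySem.Dict.keys (PySem.Dict.ofList dict) with hks
  set S := PySem.List.sorted ks (fun x => x) false with hS
  have hperm : S.Perm ks := PySem.List.sorted_perm ..
  have hle : S.Pairwise (· ≤ ·) := PySem.List.sorted_pairwise ..
  have hnd : ks.Nodup := PySem.Dict.nodup_keys_ofList ..
  have hndS : S.Nodup := hperm.nodup_iff.mpr hnd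
  have hlt : S.Pairwise (· < ·) :=
    (hle.and hndS).imp (fun h => lt_of_le_of_ne h.1 h.2)
  -- A side
  rw [nidLoopA_eq_goA, nidGoA_spec _ _ _ hlt]
  -- B side: split the triple fold into three folds
  rw [PySem.List.foldl_prod_mk
        (f := fun (b : Bool) k => b || (k == key))
        (g := fun (p : Option String × Option String) k => (nidMin p.1 k, nidSucc key p.2 k)),
      PySem.List.foldl_prod_mk
        (f := fun a k => nidMin a k)
        (g := fun a k => nidSucc key a k)]
  simp only [nid_foldl_or_beq, Bool.false_or]
  have hsucc : ks.foldl (fun a k => nidSucc key a k) none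
      = (S.filter (fun k => decide (key < k))).head? := by
    simp only [nidSucc]
    rw [PySem.List.foldl_ite_eq_foldl_filter (p := fun k => key < k) (f := nidMin)]
    exact nidMin_fold_eq_head _ _ (hperm.filter _).symm (hle.filter _)
  have hmin : ks.foldl (fun a k => nidMin a k) none = S.head? :=
    nidMin_fold_eq_head _ _ hperm.symm hle
  by_cases hk : key ∈ ks
  · have hkS : key ∈ S := (PySem.List.mem_sorted ..).mpr hk
    simp only [hk, decide_true, hkS, if_pos, hsucc, hmin]
    cases hF : S.filter (fun k => decide (key < k)) with
    | nil => simp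
    | cons y t => simp
  · have hkS : key ∉ S := fun h => hk ((PySem.List.mem_sorted ..).mp h)
    simp [hk, hkS]
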